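-- pv_equiv track=rewrite | github.com/tarang-tj/AutoAppli | backend/app/services/ical_service.py | _fold_line
-- ===== SOURCE A (Python) =====
-- CRLF = "\r\n"
--
-- def _fold_line(line: str, octet_limit: int = 75) -> str:
--     """Fold a single content line per RFC 5545 §3.1.
--
--     Lines longer than ``octet_limit`` octets (UTF-8 bytes) are split with
--     CRLF + a single space continuation. We split on octet boundaries that
--     don't break a multi-byte UTF-8 sequence.
--     """
--     encoded = line.encode("utf-8")
--     if len(encoded) <= octet_limit:
--         return line
--
--     chunks: list[bytes] = []
--     start = 0
--     # First chunk gets the full octet_limit; subsequent chunks reserve 1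
--     # octet for the leading space, so they take octet_limit - 1.
--     first = True
--     while start < len(encoded):
--         limit = octet_limit if first else octet_limit - 1
--         end = min(start + limit, len(encoded))
--         # Don't split inside a UTF-8 multi-byte sequence: a continuation
--         # byte starts with 10xxxxxx (0x80–0xBF). Walk back if needed.
--         while end < len(encoded) and (encoded[end] & 0xC0) == 0x80:
--             end -= 1
--         chunks.append(encoded[start:end])
--         start = end
--         first = False
--
--     decoded = [chunks[0].decode("utf-8")]
--     for c in chunks[1:]:
--         decoded.append(" " + c.decode("utf-8"))
--     return CRLF.join(decoded)
-- ===== SOURCE B (Python) =====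
-- CRLF = "\r\n"
--
-- def _fold_line(line: str, octet_limit: int = 75) -> str:
--     """Fold a content line per RFC 5545 by a single forward character pass:
--     greedily pack characters into chunks by UTF-8 byte budget (full limit for
--     the first chunk, limit-1 for continuations), then join with CRLF+space."""
--     if len(line.encode("utf-8")) <= octet_limit:
--         return line
--     chunks = []
--     cur, cur_bytes = "", 0
--     for ch in line:
--         b = len(ch.encode("utf-8"))
--         budget = octet_limit if not chunks else octet_limit - 1
--         if cur_bytes + b > budget:
--             chunks.append(cur)
--             cur, cur_bytes = "", 0
--         cur += ch
--         cur_bytes += b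
--     chunks.append(cur)
--     return CRLF.join([chunks[0]] + [" " + c for c in chunks[1:]])
-- ===== Notes on version B (the rewrite author's own statement) =====
-- stated objective: simpler
-- what changed: Replaces A's while-loop over byte offsets with slicing plus an inner walk-back repair loop for multi-byte boundaries by a single forward pass over characters that keeps a running UTF-8 byte budget and flushes chunks greedily.
-- outside the precondition, e.g. on _fold_line('abc', 1): A does not finish within the time limit, B returns 'a\r\n b\r\n c'
import Mathlib
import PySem

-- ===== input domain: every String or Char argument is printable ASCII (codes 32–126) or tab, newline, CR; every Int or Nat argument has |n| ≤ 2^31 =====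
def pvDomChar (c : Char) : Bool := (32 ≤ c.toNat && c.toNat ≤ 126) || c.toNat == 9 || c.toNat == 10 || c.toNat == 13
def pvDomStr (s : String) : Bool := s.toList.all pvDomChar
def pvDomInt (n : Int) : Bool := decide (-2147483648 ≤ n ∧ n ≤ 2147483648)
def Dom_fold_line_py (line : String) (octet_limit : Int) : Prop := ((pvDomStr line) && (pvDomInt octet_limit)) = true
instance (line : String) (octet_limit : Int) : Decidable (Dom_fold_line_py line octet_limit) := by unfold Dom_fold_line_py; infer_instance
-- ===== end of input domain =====

-- B replaces A's byte-slice-then-walk-back loop by a single forward character pass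
-- with a running byte budget (objective: simpler; no speed claim).

-- ===== PORT A =====
-- On the ASCII domain Dom_, `line.encode("utf-8")` is byte-for-char identical to
-- `line.toList` (every admitted char is one UTF-8 byte equal to its code), so the
-- byte string is ported as List Char and a byte value as Char.toNat: exact on Dom_.

-- inner walk-back: `while end < len(encoded) and (encoded[end] & 0xC0) == 0x80: end -= 1`
def pvWalkBack (encoded : List Char) (e : Nat) : Nat → Nat
  | 0 => e
  | fuel + 1 =>
    if e < encoded.length && (((encoded.getD e ' ').toNat &&& 0xC0) == 0x80)
    then pvWalkBack encoded (e - 1) fuel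
    else e

-- outer `while start < len(encoded)` loop, fuel-bounded (the Python loop is a while;
-- inside Pre_ the fuel `encoded.length + 1` is never exhausted)
def pvALoop (encoded : List Char) (octet_limit : Int) :
    Nat → Bool → List (List Char) → Nat → List (List Char)
  | _, _, acc, 0 => acc
  | start, first, acc, fuel + 1 =>
    if start < encoded.length then
      let limit : Int := if first then octet_limit else octet_limit - 1
      let e0 : Int := min ((start : Int) + limit) (encoded.length : Int)
      let e : Nat := pvWalkBack encoded e0.toNat (e0.toNat + 1)
      let chunk := (encoded.drop start).take (e - start)
      pvALoop encoded octet_limit e false (acc ++ [chunk]) fuel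
    else acc

def fold_line_py (line : String) (octet_limit : Int) : String :=
  let encoded := line.toList
  if (encoded.length : Int) ≤ octet_limit then line
  else
    let chunks := pvALoop encoded octet_limit 0 true [] (encoded.length + 1)
    let decoded : List (List Char) :=
      match chunks with
      | [] => []            -- unreachable inside Pre_: the loop runs at least once
      | c :: rest => c :: rest.map (fun c => ' ' :: c)
    String.ofList (PySem.Chars.join ['\r', '\n'] decoded)

-- ===== PORT B =====
-- forward pass: for each char, flush the current chunk when its byte budget would
-- overflow (octet_limit for the first chunk, octet_limit - 1 afterwards);
-- `len(ch.encode("utf-8"))` is Char.utf8Size (exact for every Unicode char)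
def pvBLoop (octet_limit : Int) :
    List Char → List (List Char) → List Char → Int → List (List Char) × List Char
  | [], chunks, cur, _ => (chunks, cur)
  | ch :: rest, chunks, cur, curBytes =>
    let b : Int := ch.utf8Size
    let budget : Int := if chunks.isEmpty then octet_limit else octet_limit - 1
    if budget < curBytes + b then
      pvBLoop octet_limit rest (chunks ++ [cur]) [ch] b
    else
      pvBLoop octet_limit rest chunks (cur ++ [ch]) (curBytes + b)

def fold_line_py_alt (line : String) (octet_limit : Int) : String :=
  let cs := line.toList
  if (cs.foldl (fun a c => a + (c.utf8Size : Int)) 0) ≤ octet_limit then line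
  else
    let r := pvBLoop octet_limit cs [] [] 0
    let chunks := r.1 ++ [r.2]
    let decoded : List (List Char) :=
      match chunks with
      | [] => []
      | c :: rest => c :: rest.map (fun c => ' ' :: c)
    String.ofList (PySem.Chars.join ['\r', '\n'] decoded)

-- ===== PRECONDITION & SPEC =====
-- Pre_ excludes only the inputs on which A never returns: a line strictly longer
-- (in UTF-8 octets) than an octet_limit ≤ 1 makes A's while-loop spin forever
-- (continuation chunks get a budget ≤ 0, so `start` stops advancing).
def Pre_fold_line_py (line : String) (octet_limit : Int) : Prop :=
  (line.toList.length : Int) ≤ octet_limit ∨ 2 ≤ octet_limit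
instance (line : String) (octet_limit : Int) : Decidable (Pre_fold_line_py line octet_limit) := by
  unfold Pre_fold_line_py; infer_instance

def pvWitness_fold_line_py : String × Int := ("hello world", 4)

def Spec_fold_line_py (line : String) (octet_limit : Int) (out : String) : Prop := out = fold_line_py_alt line octet_limit
instance (line : String) (octet_limit : Int) (out : String) : Decidable (Spec_fold_line_py line octet_limit out) := by unfold Spec_fold_line_py; infer_instance

-- ===== CLAIM (what is proved, stated in full; the proofs are below) =====
def Claim_equal_fold_line_py : Prop := ∀ (line : String) (octet_limit : Int), Dom_fold_line_py line octet_limit → Pre_fold_line_py line octet_limit → Spec_fold_line_py line octet_limit (fold_line_py line octet_limit)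

-- ===== LEMMAS AND PROOFS =====

-- the common reference chunking: continuation chunks of m+1 characters each
def pvRefRest (m : Nat) : List Char → List (List Char)
  | [] => []
  | x :: xs => (x :: xs.take m) :: pvRefRest m (xs.drop m)
termination_by cs => cs.length
decreasing_by simp

def pvAscii (cs : List Char) : Prop := ∀ c ∈ cs, c.toNat < 128

theorem pvAscii_of_dom {s : String} (h : pvDomStr s = true) : pvAscii s.toList := by
  intro c hc
  have := (List.all_eq_true.mp h) c hc
  simp [pvDomChar] at this
  omega

theorem utf8Size_eq_one {c : Char} (h : c.toNat < 128) : c.utf8Size = 1 := by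
  unfold Char.utf8Size
  have : c.val ≤ 0x7F := by
    change c.val.toNat < 128 at h
    exact UInt32.le_iff_toNat_le.mpr (by simpa using Nat.lt_succ_iff.mp h)
  simp [this]

theorem bytes_eq_length (cs : List Char) (h : pvAscii cs) (a : Int) :
    cs.foldl (fun a c => a + (c.utf8Size : Int)) a = a + cs.length := by
  induction cs generalizing a with
  | nil => simp
  | cons c cs ih =>
    simp only [List.foldl_cons, utf8Size_eq_one (h c (by simp)), List.length_cons]
    rw [ih (fun d hd => h d (by simp [hd]))]
    push_cast; ring

theorem walkBack_id (encoded : List Char) (h : pvAscii encoded) (e fuel : Nat) :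
    pvWalkBack encoded e (fuel + 1) = e := by
  unfold pvWalkBack
  rw [if_neg]
  simp only [Bool.and_eq_true, beq_iff_eq, decide_eq_true_eq, not_and]
  intro he
  have hc : (encoded.getD e ' ').toNat < 128 := by
    have : encoded.getD e ' ' ∈ encoded := by
      rw [List.getD_eq_getElem _ _ he]; exact List.getElem_mem he
    exact h _ this
  have := Nat.and_le_left (n := (encoded.getD e ' ').toNat) (m := 0xC0)
  omega

theorem refRest_eq (m : Nat) (ys : List Char) (h : ys ≠ []) :
    pvRefRest m ys = ys.take (m + 1) :: pvRefRest m (ys.drop (m + 1)) := by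
  cases ys with
  | nil => exact absurd rfl h
  | cons x xs => simp [pvRefRest]

theorem aloop_rest (encoded : List Char) (h : pvAscii encoded) (n : Int) (hn : 2 ≤ n) :
    ∀ fuel start acc, encoded.length - start < fuel →
      pvALoop encoded n start false acc fuel
        = acc ++ pvRefRest (n.toNat - 2) (encoded.drop start) := by
  intro fuel
  induction fuel with
  | zero => intro start acc hf; omega
  | succ f ih =>
    intro start acc hf
    by_cases hs : start < encoded.length
    · rw [pvALoop, if_pos hs]
      simp only [if_neg (Bool.false_ne_true)]
      set m := n.toNat - 2 with hm
      have he0 : (min ((start : Int) + (n - 1)) (encoded.length : Int)).toNat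
          = min (start + (m + 1)) encoded.length := by omega
      rw [he0, walkBack_id encoded h]
      set e := min (start + (m + 1)) encoded.length with hedef
      have h1 : start + 1 ≤ e := by omega
      have ihh := ih e (acc ++ [(encoded.drop start).take (e - start)]) (by omega)
      rw [ihh, List.append_assoc]
      congr 1
      have hys : encoded.drop start ≠ [] := by
        intro hnil
        have := List.drop_eq_nil_iff.mp hnil
        omega
      rw [refRest_eq m _ hys]
      have hlen : (encoded.drop start).length = encoded.length - start := List.length_drop ..
      have htake : (encoded.drop start).take (e - start) = (encoded.drop start).take (m + 1) := by
        rcases le_or_gt (encoded.length - start) (m + 1) with hle | hlt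
        · rw [show e - start = (encoded.drop start).length by omega, List.take_length]
          rw [List.take_of_length_le (by omega)]
        · congr 1; omega
      have hdrop : encoded.drop e = (encoded.drop start).drop (m + 1) := by
        rcases le_or_gt (encoded.length - start) (m + 1) with hle | hlt
        · rw [List.drop_eq_nil_iff.mpr (by omega), List.drop_eq_nil_iff.mpr (by omega)]
        · rw [List.drop_drop]; congr 1; omega
      rw [htake, hdrop]
      simp
    · rw [pvALoop, if_neg hs]
      rw [List.drop_eq_nil_iff.mpr (by omega)]
      simp [pvRefRest]

theorem bloop_rest (n : Int) (hn : 2 ≤ n) :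
    ∀ (xs : List Char) (chunks : List (List Char)) (cur : List Char),
      pvAscii xs → chunks ≠ [] → cur ≠ [] → (cur.length : Int) ≤ n - 1 →
      (pvBLoop n xs chunks cur cur.length).1 ++ [(pvBLoop n xs chunks cur cur.length).2]
        = chunks ++ pvRefRest (n.toNat - 2) (cur ++ xs) := by
  intro xs
  induction xs with
  | nil =>
    intro chunks cur _ _ hcne hclen
    rw [pvBLoop]
    rw [List.append_nil, refRest_eq _ _ hcne,
      List.take_of_length_le (by omega), List.drop_eq_nil_iff.mpr (by omega)]
    simp [pvRefRest]
  | cons ch xs ih =>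
    intro chunks cur hascii hne hcne hclen
    have hch : (ch.utf8Size : Int) = 1 := by
      rw [utf8Size_eq_one (hascii ch (by simp))]; rfl
    have hxs : pvAscii xs := fun d hd => hascii d (by simp [hd])
    rw [pvBLoop]
    have hie : chunks.isEmpty = false := by
      cases chunks
      · exact absurd rfl hne
      · rfl
    simp only [hie, Bool.false_eq_true, if_false, hch]
    by_cases hfull : (n - 1 : Int) < cur.length + 1
    · rw [if_pos hfull]
      have := ih (chunks ++ [cur]) [ch] hxs (by simp) (by simp) (by simp; omega)
      norm_num at this
      rw [this]
      have hlen' : cur.length = n.toNat - 2 + 1 := by omega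
      have h2 : (cur ++ ch :: xs).take (n.toNat - 2 + 1) = cur := by
        rw [← hlen']; exact List.take_left ..
      have h3 : (cur ++ ch :: xs).drop (n.toNat - 2 + 1) = ch :: xs := by
        rw [← hlen']; exact List.drop_left ..
      rw [refRest_eq (n.toNat - 2) (cur ++ ch :: xs) (by simp), h2, h3]
    · rw [if_neg hfull]
      have hlen : ((cur ++ [ch]).length : Int) = cur.length + 1 := by simp
      have := ih chunks (cur ++ [ch]) hxs hne (by simp) (by rw [hlen]; omega)
      rw [hlen] at this
      rw [this, List.append_assoc]
      simp

theorem bloop_first (n : Int) (hn : 2 ≤ n) :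
    ∀ (xs cur : List Char), pvAscii xs → (cur.length : Int) ≤ n →
      (pvBLoop n xs [] cur cur.length).1 ++ [(pvBLoop n xs [] cur cur.length).2]
        = if (cur ++ xs).length ≤ n.toNat then [cur ++ xs]
          else (cur ++ xs).take n.toNat :: pvRefRest (n.toNat - 2) ((cur ++ xs).drop n.toNat) := by
  intro xs
  induction xs with
  | nil =>
    intro cur _ hclen
    rw [pvBLoop, if_pos (by simp; omega)]
    simp
  | cons ch xs ih =>
    intro cur hascii hclen
    have hch : (ch.utf8Size : Int) = 1 := by
      rw [utf8Size_eq_one (hascii ch (by simp))]; rfl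
    have hxs : pvAscii xs := fun d hd => hascii d (by simp [hd])
    rw [pvBLoop]
    simp only [List.isEmpty_nil, if_pos, hch]
    by_cases hfull : n < (cur.length : Int) + 1
    · rw [if_pos hfull]
      have hlen' : cur.length = n.toNat := by omega
      have := bloop_rest n hn xs [cur] [ch] hxs (by simp) (by simp) (by simp; omega)
      norm_num at this
      simp only [List.nil_append]
      rw [this]
      rw [if_neg (by simp; omega)]
      have h2 : (cur ++ ch :: xs).take n.toNat = cur := by
        rw [← hlen']; exact List.take_left ..
      have h3 : (cur ++ ch :: xs).drop n.toNat = ch :: xs := by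
        rw [← hlen']; exact List.drop_left ..
      rw [h2, h3]
    · rw [if_neg hfull]
      have hlen : ((cur ++ [ch]).length : Int) = cur.length + 1 := by simp
      have := ih (cur ++ [ch]) hxs (by rw [hlen]; omega)
      rw [hlen] at this
      rw [this]
      simp

-- ===== VERDICT (by name: the statement is the Claim_ definition above) =====
theorem fold_line_py_spec : Claim_equal_fold_line_py := by
  intro line n hdom hpre
  unfold Spec_fold_line_py fold_line_py fold_line_py_alt
  have hascii : pvAscii line.toList :=
    pvAscii_of_dom (by
      unfold Dom_fold_line_py at hdom
      simp only [Bool.and_eq_true] at hdom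
      exact hdom.1)
  set cs := line.toList with hcs
  have hbytes : cs.foldl (fun a c => a + (c.utf8Size : Int)) 0 = cs.length :=
    by simpa using bytes_eq_length cs hascii 0
  dsimp only
  rw [hbytes]
  by_cases hshort : (cs.length : Int) ≤ n
  · rw [if_pos hshort, if_pos hshort]
  · rw [if_neg hshort, if_neg hshort]
    have hn : 2 ≤ n := by
      rcases hpre with h | h
      · exact absurd h hshort
      · exact h
    have hnlt : n < cs.length := by omega
    -- A side: peel the first iteration, then aloop_rest
    have hA : pvALoop cs n 0 true [] (cs.length + 1)
        = cs.take n.toNat :: pvRefRest (n.toNat - 2) (cs.drop n.toNat) := by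
      rw [pvALoop, if_pos (by omega)]
      simp only [if_true]
      have he0 : (min (((0:Nat) : Int) + n) (cs.length : Int)).toNat = n.toNat := by omega
      rw [he0, walkBack_id cs hascii]
      rw [aloop_rest cs hascii n hn cs.length n.toNat _ (by omega)]
      simp
    -- B side: bloop_first with an empty current chunk
    have hB := bloop_first n hn cs [] hascii (by simp; omega)
    norm_num at hB
    rw [if_neg (by omega)] at hB
    rw [hA, hB]
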